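-- pv_equiv track=rewrite | github.com/SharminAkter3/Python | Assignment-01/C_Good_Sequence.py | remove_sequence
-- ===== SOURCE A (Python) =====
-- def remove_sequence(n, lst):
--     numbers = {}
--     for num in lst:
--         numbers[num] = numbers.get(num, 0) + 1
--
--     removed = 0
--     for num, cnt in numbers.items():
--         if cnt > num:
--             removed += cnt - num
--         elif cnt < num:
--             removed += cnt
--
--     return removed
-- ===== SOURCE B (Python) =====
-- def _extra(num, cnt):
--     if cnt > num:
--         return cnt - num
--     if cnt < num:
--         return cnt
--     return 0
--
--
-- def remove_sequence(n, lst):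
--     s = sorted(lst)
--     if not s:
--         return 0
--     removed = 0
--     cur = s[0]
--     cnt = 1
--     for x in s[1:]:
--         if x == cur:
--             cnt += 1
--         else:
--             removed += _extra(cur, cnt)
--             cur, cnt = x, 1
--     return removed + _extra(cur, cnt)
-- ===== Notes on version B (the rewrite author's own statement) =====
-- stated objective: alternative
-- what changed: Replaces the frequency dictionary and its items() pass with sorting the list and a single scan over consecutive equal runs, accumulating the removal count per run.
import Mathlib
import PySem

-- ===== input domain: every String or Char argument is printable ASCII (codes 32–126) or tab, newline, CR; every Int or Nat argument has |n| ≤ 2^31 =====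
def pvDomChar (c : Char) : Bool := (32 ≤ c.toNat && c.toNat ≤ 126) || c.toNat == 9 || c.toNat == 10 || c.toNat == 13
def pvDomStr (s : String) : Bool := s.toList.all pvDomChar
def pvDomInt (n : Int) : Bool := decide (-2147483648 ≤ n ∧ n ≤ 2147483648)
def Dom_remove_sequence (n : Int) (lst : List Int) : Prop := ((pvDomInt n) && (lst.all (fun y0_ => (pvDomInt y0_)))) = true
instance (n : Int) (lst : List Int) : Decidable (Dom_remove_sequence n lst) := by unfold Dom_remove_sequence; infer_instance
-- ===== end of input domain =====

-- B sorts the list and scans consecutive equal runs instead of building a frequency dict (alternative decomposition).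

-- ===== PORT A =====
def remove_sequence (n : Int) (lst : List Int) : Int :=
  let numbers := lst.foldl (fun d num => d.insert num (d.getD num 0 + 1)) (PySem.Dict.empty : PySem.Dict Int Int)
  numbers.items.foldl (fun removed p =>
    if p.2 > p.1 then removed + (p.2 - p.1)
    else if p.2 < p.1 then removed + p.2
    else removed) 0

-- ===== PORT B =====
-- helper _extra of Source B
def pyExtra (num cnt : Int) : Int :=
  if cnt > num then cnt - num
  else if cnt < num then cnt
  else 0

def remove_sequence_alt (n : Int) (lst : List Int) : Int :=
  match PySem.List.sorted lst (fun x => x) false with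
  | [] => 0
  | v :: rest =>
      let st := rest.foldl (fun st x =>
        if x == st.1 then (st.1, st.2.1 + 1, st.2.2)
        else (x, (1 : Int), st.2.2 + pyExtra st.1 st.2.1)) (v, (1 : Int), (0 : Int))
      st.2.2 + pyExtra st.1 st.2.1

-- ===== PRECONDITION & SPEC =====
def Spec_remove_sequence (n : Int) (lst : List Int) (out : Int) : Prop := out = remove_sequence_alt n lst
instance (n : Int) (lst : List Int) (out : Int) : Decidable (Spec_remove_sequence n lst out) := by unfold Spec_remove_sequence; infer_instance

-- ===== CLAIM (what is proved, stated in full; the proofs are below) =====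
def Claim_equal_remove_sequence : Prop := ∀ (n : Int) (lst : List Int), Dom_remove_sequence n lst → Spec_remove_sequence n lst (remove_sequence n lst)

-- ===== LEMMAS AND PROOFS =====

-- total removal count as a sum over the distinct values
def gsum (l : List Int) : Int := ∑ v ∈ l.toFinset, pyExtra v (l.count v : Int)

-- the final step of B's scan
def finishScan (st : Int × Int × Int) : Int := st.2.2 + pyExtra st.1 st.2.1

theorem gsum_perm (l l' : List Int) (h : l.Perm l') : gsum l = gsum l' := by
  unfold gsum
  rw [List.toFinset_eq_of_perm l l' h]
  exact Finset.sum_congr rfl (fun v _ => by rw [h.count_eq])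

theorem gsum_cons (x : Int) (l : List Int) :
    gsum (x :: l) = pyExtra x ((l.count x : Int) + 1) + gsum (l.filter (fun y => y != x)) := by
  unfold gsum
  have hx : x ∈ (x :: l).toFinset := by simp
  rw [← Finset.add_sum_erase _ _ hx]
  have h1 : (((x :: l).count x : Int)) = (l.count x : Int) + 1 := by
    rw [List.count_cons_self]; push_cast; ring
  rw [h1]
  have h2 : (x :: l).toFinset.erase x = (l.filter (fun y => y != x)).toFinset := by
    ext v
    simp only [Finset.mem_erase, List.mem_toFinset, List.mem_cons, List.mem_filter, bne_iff_ne,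
      ne_eq]
    constructor
    · rintro ⟨hvx, hv⟩
      rcases hv with h | h
      · exact absurd h hvx
      · exact ⟨h, hvx⟩
    · rintro ⟨hv, hvx⟩
      exact ⟨hvx, Or.inr hv⟩
  rw [h2]
  congr 1
  refine Finset.sum_congr rfl (fun v hv => ?_)
  simp only [List.mem_toFinset, List.mem_filter, bne_iff_ne, ne_eq] at hv
  have hvx : v ≠ x := hv.2
  rw [List.count_filter (by simp [hvx])]
  simp [Ne.symm hvx]

theorem foldlA (ps : List (Int × Int)) (a : Int) :
    ps.foldl (fun removed p =>
      if p.2 > p.1 then removed + (p.2 - p.1)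
      else if p.2 < p.1 then removed + p.2
      else removed) a = a + (ps.map (fun p => pyExtra p.1 p.2)).sum := by
  induction ps generalizing a with
  | nil => simp
  | cons p ps ih =>
    simp only [List.foldl_cons, List.map_cons, List.sum_cons, ih, pyExtra]
    split_ifs <;> ring

theorem toFinset_ofList (l : List Int) : (PySem.Set.ofList l).toFinset = l.toFinset := by
  ext v; simp [PySem.Set.mem_ofList]

theorem A_eq_gsum (n : Int) (lst : List Int) : remove_sequence n lst = gsum lst := by
  have hA : remove_sequence n lst = ((PySem.Dict.counter lst).items).foldl
      (fun removed p =>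
        if p.2 > p.1 then removed + (p.2 - p.1)
        else if p.2 < p.1 then removed + p.2
        else removed) 0 := rfl
  rw [hA, PySem.Dict.items_counter, foldlA, List.map_map]
  unfold gsum
  rw [← toFinset_ofList, List.sum_toFinset _ (PySem.Set.nodup_ofList lst)]
  simp only [zero_add]
  exact congrArg List.sum (List.map_congr_left fun v _ => rfl)

theorem scan_fold (rest : List Int) (v c removed : Int)
    (h : (v :: rest).Pairwise (· ≤ ·)) :
    finishScan (rest.foldl (fun st x =>
        if x == st.1 then (st.1, st.2.1 + 1, st.2.2)
        else (x, (1 : Int), st.2.2 + pyExtra st.1 st.2.1)) (v, c, removed))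
    = removed + pyExtra v (c + (rest.count v : Int)) + gsum (rest.filter (fun y => y != v)) := by
  induction rest generalizing v c removed with
  | nil => simp [finishScan, gsum]
  | cons x rest ih =>
    have hvx : v ≤ x := (List.pairwise_cons.mp h).1 x (by simp)
    have htail : (x :: rest).Pairwise (· ≤ ·) := (List.pairwise_cons.mp h).2
    by_cases hx : x = v
    · subst hx
      simp only [List.foldl_cons, beq_self_eq_true, if_true]
      rw [ih x (c + 1) removed htail]
      have harg : c + 1 + (rest.count x : Int) = c + ((x :: rest).count x : Int) := by
        rw [List.count_cons_self]; push_cast; ring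
      rw [harg]
      congr 2
      simp
    · have hbeq : (x == v) = false := by simp [hx]
      simp only [List.foldl_cons, hbeq, Bool.false_eq_true, if_false]
      rw [ih x 1 (removed + pyExtra v c) htail]
      have hvnot : v ∉ x :: rest := by
        intro hmem
        rcases List.mem_cons.mp hmem with h1 | h1
        · exact hx h1.symm
        · have hxy : x ≤ v := (List.pairwise_cons.mp htail).1 v h1
          have : v < x := lt_of_le_of_ne hvx (fun e => hx e.symm)
          omega
      have hcnt : ((x :: rest).count v : Int) = 0 := by
        rw [List.count_eq_zero_of_not_mem hvnot]; rfl
      have hfilt : (x :: rest).filter (fun y => y != v) = x :: rest := by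
        apply List.filter_eq_self.mpr
        intro y hy
        simp only [bne_iff_ne, ne_eq]
        intro e; subst e; exact hvnot hy
      have e1 : c + (0 : Int) = c := by ring
      have e2 : (1 : Int) + (rest.count x : Int) = (rest.count x : Int) + 1 := by ring
      rw [hcnt, e1, hfilt, gsum_cons, e2]
      ring

theorem B_eq_gsum (n : Int) (lst : List Int) : remove_sequence_alt n lst = gsum lst := by
  rcases hs : PySem.List.sorted lst (fun x => x) false with _ | ⟨v, rest⟩
  · have hp : (PySem.List.sorted lst (fun x => x) false).Perm lst :=
      PySem.List.sorted_perm lst (fun x => x) false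
    rw [hs] at hp
    have hnil : lst = [] := hp.symm.eq_nil
    subst hnil
    simp only [remove_sequence_alt, hs]
    simp [gsum]
  · have hperm : (v :: rest).Perm lst := by
      have hp := PySem.List.sorted_perm lst (fun x => x) false
      rw [hs] at hp
      exact hp
    have hpw : (v :: rest).Pairwise (· ≤ ·) := by
      have hp := PySem.List.sorted_pairwise lst (fun x => x)
      rw [hs] at hp
      exact hp
    have hsc := scan_fold rest v 1 0 hpw
    unfold finishScan at hsc
    simp only [remove_sequence_alt, hs]
    rw [hsc, ← gsum_perm _ _ hperm, gsum_cons,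
      show (1 : Int) + (rest.count v : Int) = (rest.count v : Int) + 1 from by ring]
    ring

-- ===== VERDICT (by name: the statement is the Claim_ definition above) =====
theorem remove_sequence_spec : Claim_equal_remove_sequence := by
  intro n lst _
  unfold Spec_remove_sequence
  rw [A_eq_gsum, B_eq_gsum]
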